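-- pv_equiv track=rewrite | github.com/Lee-nju/data_analysis | model2.py | para_range
-- ===== SOURCE A (Python) =====
-- def para_range(para_num):
--     p_range = []
--     l = r = 0
--     for i in range(len(para_num)):
--         if i == 0:
--             r = para_num[0] - 1
--         else:
--             l = r + 1
--             r += para_num[i]
--         p_range.append((l, r))
--
--     return p_range
-- ===== SOURCE B (Python) =====
-- def para_range(para_num):
--     # prefix-sum table first, then a separate pairing pass
--     ends = []
--     total = 0
--     for x in para_num:
--         total += x
--         ends.append(total)
--     starts = [0] + ends[:-1]
--     return [(s, e - 1) for s, e in zip(starts, ends)]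
-- ===== Notes on version B (the rewrite author's own statement) =====
-- stated objective: alternative
-- what changed: Replaces the single indexed loop with an i==0 branch carrying (l, r) state by a prefix-sum table (ends) plus a separate pairing pass zipping shifted starts with ends.
import Mathlib
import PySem

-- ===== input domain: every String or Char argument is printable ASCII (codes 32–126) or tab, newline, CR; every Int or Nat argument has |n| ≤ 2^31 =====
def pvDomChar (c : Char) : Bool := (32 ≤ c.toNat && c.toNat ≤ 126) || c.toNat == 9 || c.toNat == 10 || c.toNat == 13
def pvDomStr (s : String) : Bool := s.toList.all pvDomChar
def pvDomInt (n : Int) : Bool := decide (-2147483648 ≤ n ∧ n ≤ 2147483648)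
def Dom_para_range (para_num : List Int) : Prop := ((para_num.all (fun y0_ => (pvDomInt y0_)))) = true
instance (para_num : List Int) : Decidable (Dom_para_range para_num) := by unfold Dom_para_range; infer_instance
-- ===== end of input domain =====

-- B replaces A's indexed loop with a prefix-sum table and a separate pairing pass (alternative decomposition, same O(n) cost).

-- ===== PORT A =====
-- Loop body of A (state = (l, r, p_range)); the i == 0 branch and the append stay as in the Python.
def paraStep (st : Int × Int × List (Int × Int)) (p : Int × Int) : Int × Int × List (Int × Int) :=
  let l := st.1; let r := st.2.1; let acc := st.2.2
  if p.1 == 0 then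
    let r' := p.2 - 1
    (l, r', acc ++ [(l, r')])
  else
    let l' := r + 1
    let r' := r + p.2
    (l', r', acc ++ [(l', r')])

-- 'for i in range(len(para_num))' indexing para_num[i] is ported as a fold over
-- PySem.List.enumerate para_num (exact: i is the index, the lookup never raises here).
def para_range (para_num : List Int) : List (Int × Int) :=
  ((PySem.List.enumerate para_num).foldl paraStep (0, 0, [])).2.2

-- ===== PORT B =====
-- Loop body of B's first pass: state = (ends, total); total += x; ends.append(total).
def sumStep (st : List Int × Int) (x : Int) : List Int × Int :=
  (st.1 ++ [st.2 + x], st.2 + x)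

-- ends[:-1] on a Python list is exactly List.dropLast (also for the empty list).
def para_range_alt (para_num : List Int) : List (Int × Int) :=
  let ends := (para_num.foldl sumStep ([], 0)).1
  let starts := 0 :: ends.dropLast
  (starts.zip ends).map (fun p => (p.1, p.2 - 1))

-- ===== PRECONDITION & SPEC =====
def Spec_para_range (para_num : List Int) (out : List (Int × Int)) : Prop := out = para_range_alt para_num
instance (para_num : List Int) (out : List (Int × Int)) : Decidable (Spec_para_range para_num out) := by unfold Spec_para_range; infer_instance

-- ===== CLAIM (what is proved, stated in full; the proofs are below) =====
def Claim_equal_para_range : Prop := ∀ (para_num : List Int), Dom_para_range para_num → Spec_para_range para_num (para_range para_num)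

-- ===== LEMMAS AND PROOFS =====

/-- The ranges A's loop emits after the first iteration, as a simple recursion on the tail. -/
def gRanges (r : Int) : List Int → List (Int × Int)
  | [] => []
  | x :: xs => (r + 1, r + x) :: gRanges (r + x) xs

/-- Prefix sums starting from a running total `t`. -/
def hSums (t : Int) : List Int → List Int
  | [] => []
  | x :: xs => (t + x) :: hSums (t + x) xs

theorem foldA_tail (xs : List Int) : ∀ (s l r : Int) (acc : List (Int × Int)), 1 ≤ s →
    ((PySem.List.enumerate xs s).foldl paraStep (l, r, acc)).2.2 = acc ++ gRanges r xs := by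
  induction xs with
  | nil => intro s l r acc hs; simp [PySem.List.enumerate_nil, gRanges]
  | cons x xs ih =>
    intro s l r acc hs
    rw [PySem.List.enumerate_cons]
    have hne : (s == 0) = false := by simp; omega
    simp only [List.foldl_cons, paraStep, hne]
    rw [ih (s + 1) _ _ _ (by omega)]
    simp [gRanges]

theorem foldB_sums (xs : List Int) : ∀ (e : List Int) (t : Int),
    (xs.foldl sumStep (e, t)).1 = e ++ hSums t xs := by
  induction xs with
  | nil => intro e t; simp [hSums]
  | cons x xs ih =>
    intro e t
    simp only [List.foldl_cons, sumStep]
    rw [ih]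
    simp [hSums]

theorem zip_sums (xs : List Int) : ∀ (c : Int),
    (((c :: hSums c xs).dropLast).zip (hSums c xs)).map (fun p => (p.1, p.2 - 1))
      = gRanges (c - 1) xs := by
  induction xs with
  | nil => intro c; simp [hSums, gRanges]
  | cons y ys ih =>
    intro c
    simp only [hSums, gRanges, List.dropLast_cons₂, List.zip_cons_cons, List.map_cons]
    rw [show c - 1 + 1 = c from by ring, show c - 1 + y = c + y - 1 from by ring]
    rw [ih (c + y)]

-- ===== VERDICT (by name: the statement is the Claim_ definition above) =====
theorem para_range_spec : Claim_equal_para_range := by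
  intro para_num _
  unfold Spec_para_range
  cases para_num with
  | nil => rfl
  | cons x xs =>
    unfold para_range para_range_alt
    rw [PySem.List.enumerate_cons, List.foldl_cons,
        show paraStep (0, 0, []) ((0 : Int), x) = (0, x - 1, [(0, x - 1)]) from by
          simp [paraStep],
        foldA_tail xs (0 + 1) 0 (x - 1) [(0, x - 1)] (by omega)]
    rw [foldB_sums (x :: xs) [] 0]
    simp only [List.nil_append, hSums, zero_add, List.zip_cons_cons, List.map_cons]
    rw [zip_sums xs x]
    rfl
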